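-- pv_equiv track=rewrite | github.com/kospex/kospex | src/kospex_utils.py | merge_dicts
-- ===== SOURCE A (Python) =====
-- def merge_dicts(dict1, dict2):
--     merged_dict = {}
--
--     # Add all keys from dict1 with their values under 'recent'
--     for key in dict1:
--         merged_dict[key] = {'recent': dict1[key]}
--
--     # Add/Update keys from dict2 with their values under 'previous'
--     for key in dict2:
--         if key in merged_dict:
--             merged_dict[key]['previous'] = dict2[key]
--         else:
--             merged_dict[key] = {'previous': dict2[key]}
--
--     # Ensuring that each key has both 'recent' and 'previous' entries
--     for key in merged_dict:
--         merged_dict[key].setdefault('recent', None)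
--         merged_dict[key].setdefault('previous', None)
--
--     return merged_dict
-- ===== SOURCE B (Python) =====
-- def merge_dicts(dict1, dict2):
--     # Consume a shrinking working copy of dict2: popping each dict1 key pairs it
--     # with its 'previous' value, and whatever survives the pops is exactly the
--     # dict2-only tail -- no membership tests and no setdefault fixup pass.
--     remaining = dict(dict2)
--     merged = {}
--     for key, value in dict1.items():
--         merged[key] = {'recent': value, 'previous': remaining.pop(key, None)}
--     for key, value in remaining.items():
--         merged[key] = {'previous': value, 'recent': None}
--     return merged
-- ===== Notes on version B (the rewrite author's own statement) =====
-- stated objective: alternative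
-- what changed: A's three passes (populate 'recent' from dict1, add/update 'previous' from dict2 with a membership test, then a setdefault fixup over every key) are replaced by destructive consumption of a working copy of dict2: each dict1 key pops its 'previous' value out of the copy, and the copy that survives the pops is exactly the dict2-only tail, so there is no membership test and no reconciliation pass.
import Mathlib
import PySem

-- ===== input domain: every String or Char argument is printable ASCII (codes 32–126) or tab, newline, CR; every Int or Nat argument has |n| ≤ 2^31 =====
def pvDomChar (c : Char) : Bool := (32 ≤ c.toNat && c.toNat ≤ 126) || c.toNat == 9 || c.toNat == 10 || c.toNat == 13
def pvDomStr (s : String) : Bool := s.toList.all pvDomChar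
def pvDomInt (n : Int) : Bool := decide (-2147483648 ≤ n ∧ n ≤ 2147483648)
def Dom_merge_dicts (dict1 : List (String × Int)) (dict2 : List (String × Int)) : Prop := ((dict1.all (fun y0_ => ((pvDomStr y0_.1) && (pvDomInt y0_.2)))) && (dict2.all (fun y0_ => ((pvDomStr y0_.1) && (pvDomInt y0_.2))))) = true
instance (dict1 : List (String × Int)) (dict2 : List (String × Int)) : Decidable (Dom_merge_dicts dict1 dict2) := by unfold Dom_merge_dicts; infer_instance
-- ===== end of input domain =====

-- B replaces A's three passes (populate 'recent', add/update 'previous', setdefault fixup)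
-- by destructively consuming a working copy of dict2 with pop: each dict1 key takes its
-- 'previous' value out of the copy, and the surviving copy is the dict2-only tail;
-- objective: alternative (no membership tests, no reconciliation pass).

-- ===== PORT A =====
-- loop body of A's first pass: merged_dict[key] = {'recent': dict1[key]}
def mergeA1 (m : PySem.Dict String (PySem.Dict String (Option Int))) (kv : String × Int) :
    PySem.Dict String (PySem.Dict String (Option Int)) :=
  m.insert kv.1 (PySem.Dict.ofList [("recent", some kv.2)])

-- loop body of A's second pass
def mergeA2 (m : PySem.Dict String (PySem.Dict String (Option Int))) (kv : String × Int) :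
    PySem.Dict String (PySem.Dict String (Option Int)) :=
  if m.contains kv.1 then
    m.insert kv.1 ((m.getD kv.1 PySem.Dict.empty).insert "previous" (some kv.2))
  else
    m.insert kv.1 (PySem.Dict.ofList [("previous", some kv.2)])

-- loop body of A's third pass (the two setdefault calls, written back)
def mergeA3 (m : PySem.Dict String (PySem.Dict String (Option Int))) (k : String) :
    PySem.Dict String (PySem.Dict String (Option Int)) :=
  m.insert k (((m.getD k PySem.Dict.empty).setdefault "recent" none).setdefault "previous" none)

def merge_dicts (dict1 : List (String × Int)) (dict2 : List (String × Int)) :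
    List (String × List (String × Option Int)) :=
  let m1 := dict1.foldl mergeA1 PySem.Dict.empty
  let m2 := dict2.foldl mergeA2 m1
  let m3 := m2.keys.foldl mergeA3 m2
  m3.items.map (fun p => (p.1, p.2.items))

-- ===== PORT B =====
-- loop body of B's first pass: merged[key] = {'recent': value, 'previous': remaining.pop(key, None)}
-- (pop with default = read get?, then erase; erase of an absent key is a no-op, as in Python)
def mergeB1 (st : PySem.Dict String Int × PySem.Dict String (List (String × Option Int)))
    (kv : String × Int) :
    PySem.Dict String Int × PySem.Dict String (List (String × Option Int)) :=
  (st.1.erase kv.1, st.2.insert kv.1 [("recent", some kv.2), ("previous", st.1.get? kv.1)])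

-- loop body of B's second pass: merged[key] = {'previous': value, 'recent': None}
def mergeB2 (out : PySem.Dict String (List (String × Option Int))) (kv : String × Int) :
    PySem.Dict String (List (String × Option Int)) :=
  out.insert kv.1 [("previous", some kv.2), ("recent", none)]

def merge_dicts_alt (dict1 : List (String × Int)) (dict2 : List (String × Int)) :
    List (String × List (String × Option Int)) :=
  let st := dict1.foldl mergeB1 (PySem.Dict.ofList dict2, PySem.Dict.empty)
  let merged := st.1.items.foldl mergeB2 st.2
  merged.items

-- ===== PRECONDITION & SPEC =====
-- Pre_ requires distinct keys in each input list because the lists model Python dicts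
-- (whose keys are necessarily distinct); a duplicate-key list corresponds to no dict input of A.
def Pre_merge_dicts (dict1 : List (String × Int)) (dict2 : List (String × Int)) : Prop :=
  (dict1.map Prod.fst).Nodup ∧ (dict2.map Prod.fst).Nodup
instance (dict1 : List (String × Int)) (dict2 : List (String × Int)) : Decidable (Pre_merge_dicts dict1 dict2) := by unfold Pre_merge_dicts; infer_instance

def pvWitness_merge_dicts : (List (String × Int)) × (List (String × Int)) :=
  ([("a", 1), ("b", 2)], [("b", 3), ("c", 4)])

def Spec_merge_dicts (dict1 : List (String × Int)) (dict2 : List (String × Int)) (out : List (String × List (String × Option Int))) : Prop := out = merge_dicts_alt dict1 dict2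
instance (dict1 : List (String × Int)) (dict2 : List (String × Int)) (out : List (String × List (String × Option Int))) : Decidable (Spec_merge_dicts dict1 dict2 out) := by unfold Spec_merge_dicts; infer_instance

-- ===== CLAIM (what is proved, stated in full; the proofs are below) =====
def Claim_equal_merge_dicts : Prop := ∀ (dict1 : List (String × Int)) (dict2 : List (String × Int)), Dom_merge_dicts dict1 dict2 → Pre_merge_dicts dict1 dict2 → Spec_merge_dicts dict1 dict2 (merge_dicts dict1 dict2)

-- ===== LEMMAS AND PROOFS =====

-- the canonical item list both programs produce (proof-side helper only)
def canonMerge (d1 d2 : List (String × Int)) : List (String × List (String × Option Int)) :=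
  d1.map (fun kv => (kv.1, [("recent", some kv.2), ("previous", (PySem.Dict.mk d2).get? kv.1)]))
    ++ (d2.filter (fun q => !decide (q.1 ∈ d1.map Prod.fst))).map
        (fun q => (q.1, [("previous", some q.2), ("recent", none)]))

-- A's third-pass rewrite of one inner dict
def gfix (inner : PySem.Dict String (Option Int)) : PySem.Dict String (Option Int) :=
  (inner.setdefault "recent" none).setdefault "previous" none

-- with distinct keys, building a dict from a pair list keeps the list as the items
theorem ofList_eq_mk {ν : Type} (l : List (String × ν)) (h : (l.map Prod.fst).Nodup) :
    PySem.Dict.ofList l = PySem.Dict.mk l := by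
  apply PySem.Dict.ext
  have := PySem.Dict.items_foldl_insert_fresh l Prod.fst Prod.snd PySem.Dict.empty
    (by intro a _; simp [PySem.Dict.contains_empty]) h
  simpa [PySem.Dict.ofList, PySem.Dict.update] using this

theorem get?_mk_find? {ν : Type} (l : List (String × ν)) (x : String) :
    (PySem.Dict.mk l).get? x = (l.find? (fun p => p.1 == x)).map Prod.snd := by
  induction l with
  | nil => rfl
  | cons q rest ih =>
      rw [show (q :: rest : List (String × ν)) = (q.1, q.2) :: rest by simp,
        PySem.Dict.get?_mk_cons]
      by_cases hq : q.1 == x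
      · simp [List.find?, hq]
      · simp only [List.find?]
        rw [show (q.1 == x) = false by simpa using hq] at *
        simpa using ih

-- erasing a different key does not change a lookup
theorem get?_erase_of_ne {ν : Type} (d : PySem.Dict String ν) (k x : String) (h : x ≠ k) :
    (d.erase k).get? x = d.get? x := by
  show ((d.items.filter _).find? _).map _ = (d.items.find? _).map _
  congr 1
  induction d.items with
  | nil => rfl
  | cons q rest ih =>
      by_cases hqk : q.1 = k
      · have hkx : (k == x) = false := by simpa using (Ne.symm h)
        simp [hqk, hkx, ih]
      · by_cases hqx : q.1 = x
        · simp [hqx, h]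
        · simp [hqk, hqx, ih]

-- A's first pass builds exactly one 'recent'-singleton entry per dict1 pair
theorem pass1_items (d1 : List (String × Int)) (h : (d1.map Prod.fst).Nodup) :
    (d1.foldl mergeA1 PySem.Dict.empty).items
      = d1.map (fun kv => (kv.1, PySem.Dict.ofList [("recent", some kv.2)])) := by
  have := PySem.Dict.items_foldl_insert_fresh d1 Prod.fst
    (fun kv => PySem.Dict.ofList [("recent", some kv.2)]) PySem.Dict.empty
    (by intro a _; simp [PySem.Dict.contains_empty]) h
  simpa [mergeA1] using this

-- A's second pass: existing entries get 'previous' written in, fresh dict2 keys are appended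
theorem pass2_items (d2 : List (String × Int)) :
    ∀ (m : PySem.Dict String (PySem.Dict String (Option Int))),
      m.keys.Nodup → (d2.map Prod.fst).Nodup →
      ((d2.foldl mergeA2 m).items
        = m.items.map (fun p => match d2.find? (fun q => q.1 == p.1) with
            | some q => (p.1, p.2.insert "previous" (some q.2))
            | none => p)
          ++ (d2.filter (fun q => !m.contains q.1)).map
              (fun q => (q.1, PySem.Dict.ofList [("previous", some q.2)])))
      ∧ (d2.foldl mergeA2 m).keys.Nodup := by
  induction d2 with
  | nil => intro m hm _; simp [hm]
  | cons q d2 ih =>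
    intro m hm hnd
    have hqnotin : q.1 ∉ d2.map Prod.fst := (List.nodup_cons.mp hnd).1
    have hd2nd : (d2.map Prod.fst).Nodup := (List.nodup_cons.mp hnd).2
    have hfindq : d2.find? (fun r => r.1 == q.1) = none := by
      rw [List.find?_eq_none]
      intro r hr hbeq
      apply hqnotin
      have : r.1 = q.1 := by simpa using hbeq
      exact this ▸ List.mem_map_of_mem hr
    by_cases hc : m.contains q.1 = true
    · -- key already present: 'previous' is written into the existing inner dict
      have hitems' : (mergeA2 m q).items
          = m.items.map (fun p => if p.1 == q.1
              then (q.1, (m.getD q.1 PySem.Dict.empty).insert "previous" (some q.2)) else p) := by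
        simp only [mergeA2, if_pos hc]
        exact PySem.Dict.items_insert_of_contains m _ hc
      have hkeys' : (mergeA2 m q).keys = m.keys := by
        simp only [mergeA2, if_pos hc]
        exact PySem.Dict.keys_insert_of_contains m _ hc
      have hcont' : ∀ x, (mergeA2 m q).contains x = m.contains x := by
        intro x
        rw [Bool.eq_iff_iff, PySem.Dict.contains_iff_mem_keys, PySem.Dict.contains_iff_mem_keys, hkeys']
      obtain ⟨h1, h2⟩ := ih (mergeA2 m q) (hkeys' ▸ hm) hd2nd
      rw [List.foldl_cons]
      refine ⟨?_, h2⟩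
      rw [h1, hitems', List.map_map]
      congr 1
      · apply List.map_congr_left
        intro p hp
        by_cases hpq : p.1 = q.1
        · have hget : m.getD q.1 PySem.Dict.empty = p.2 := by
            have hmem : (q.1, p.2) ∈ m.items := by rw [← hpq]; exact hp
            exact PySem.Dict.getD_of_mem_items m hmem hm _
          have hbeq : (q.1 == p.1) = true := by simp [hpq]
          simp [Function.comp, hpq, hget, List.find?, hfindq]
        · have hbeq : (q.1 == p.1) = false := by simp; exact fun h => hpq h.symm
          simp [Function.comp, hpq, List.find?, hbeq]
      · have hq : (!m.contains q.1) = false := by simp [hc]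
        rw [List.filter_cons_of_neg (by simp [hq])]
        congr 1
        apply List.filter_congr
        intro r hr
        rw [hcont' r.1]
    · -- fresh key: a 'previous'-singleton entry is appended
      have hcb : m.contains q.1 = false := by simpa using hc
      have hitems' : (mergeA2 m q).items = m.items ++ [(q.1, PySem.Dict.ofList [("previous", some q.2)])] := by
        simp only [mergeA2, if_neg hc]
        exact PySem.Dict.items_insert_of_not_contains m _ hcb
      have hqk : q.1 ∉ m.keys := fun h => hc ((PySem.Dict.contains_iff_mem_keys m q.1).mpr h)
      have hkeys' : (mergeA2 m q).keys = m.keys ++ [q.1] := by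
        have : (mergeA2 m q).keys = (mergeA2 m q).items.map Prod.fst := rfl
        rw [this, hitems']
        simp [PySem.Dict.keys]
      have hnd' : (mergeA2 m q).keys.Nodup := by
        rw [hkeys']
        rw [List.nodup_append]
        refine ⟨hm, by simp, ?_⟩
        intro a ha b hb
        have hb' : b = q.1 := by simpa using hb
        subst hb'
        intro h
        exact hqk (h ▸ ha)
      have hcont' : ∀ x, x ≠ q.1 → (mergeA2 m q).contains x = m.contains x := by
        intro x hx
        rw [Bool.eq_iff_iff, PySem.Dict.contains_iff_mem_keys, PySem.Dict.contains_iff_mem_keys, hkeys']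
        simp [hx]
      obtain ⟨h1, h2⟩ := ih (mergeA2 m q) hnd' hd2nd
      rw [List.foldl_cons]
      refine ⟨?_, h2⟩
      rw [h1, hitems']
      rw [List.map_append]
      have hnew : ([(q.1, PySem.Dict.ofList [("previous", some q.2)])].map
          (fun p => match d2.find? (fun r => r.1 == p.1) with
            | some r => (p.1, p.2.insert "previous" (some r.2))
            | none => p))
          = [(q.1, PySem.Dict.ofList [("previous", some q.2)])] := by
        simp [hfindq]
      rw [hnew, List.append_assoc]
      congr 1
      · apply List.map_congr_left
        intro p hp
        have hpq : p.1 ≠ q.1 := by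
          intro h
          exact hqk (h ▸ List.mem_map_of_mem hp)
        have hbeq : (q.1 == p.1) = false := by simp; exact fun h => hpq h.symm
        simp [List.find?, hbeq]
      · rw [List.filter_cons_of_pos (by simp [hcb]), List.map_cons, List.singleton_append]
        congr 1
        congr 1
        apply List.filter_congr
        intro r hr
        have hrq : r.1 ≠ q.1 := by
          intro h
          exact hqnotin (h ▸ List.mem_map_of_mem hr)
        rw [hcont' r.1 hrq]

-- A's third pass maps gfix over every entry
theorem pass3_items (ks : List String) :
    ∀ (m : PySem.Dict String (PySem.Dict String (Option Int))),
      ks.Nodup → m.keys.Nodup → (∀ k ∈ ks, m.contains k = true) →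
      (ks.foldl mergeA3 m).items
        = m.items.map (fun p => if p.1 ∈ ks then (p.1, gfix p.2) else p) := by
  induction ks with
  | nil => intro m _ _ _; simp
  | cons k ks ih =>
    intro m hks hm hcont
    have hknotin : k ∉ ks := (List.nodup_cons.mp hks).1
    have hksnd : ks.Nodup := (List.nodup_cons.mp hks).2
    have hck : m.contains k = true := hcont k (by simp)
    have hitems' : (mergeA3 m k).items
        = m.items.map (fun p => if p.1 == k then (k, gfix (m.getD k PySem.Dict.empty)) else p) := by
      simp only [mergeA3]
      exact PySem.Dict.items_insert_of_contains m _ hck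
    have hkeys' : (mergeA3 m k).keys = m.keys := by
      simp only [mergeA3]
      exact PySem.Dict.keys_insert_of_contains m _ hck
    have hcont' : ∀ k' ∈ ks, (mergeA3 m k).contains k' = true := by
      intro k' hk'
      rw [PySem.Dict.contains_iff_mem_keys, hkeys']
      exact (PySem.Dict.contains_iff_mem_keys m k').mp (hcont k' (List.mem_cons_of_mem _ hk'))
    rw [List.foldl_cons, ih (mergeA3 m k) hksnd (hkeys' ▸ hm) hcont', hitems', List.map_map]
    apply List.map_congr_left
    intro p hp
    by_cases hpk : p.1 = k
    · have hget : m.getD k PySem.Dict.empty = p.2 := by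
        have hmem : (k, p.2) ∈ m.items := by rw [← hpk]; exact hp
        exact PySem.Dict.getD_of_mem_items m hmem hm _
      simp [Function.comp, hpk, hget, hknotin]
    · simp [Function.comp, hpk]

-- A equals the canonical list
theorem merge_dicts_eq_canon (d1 d2 : List (String × Int))
    (h1 : (d1.map Prod.fst).Nodup) (h2 : (d2.map Prod.fst).Nodup) :
    merge_dicts d1 d2 = canonMerge d1 d2 := by
  have hm1items := pass1_items d1 h1
  have hm1keys : (d1.foldl mergeA1 PySem.Dict.empty).keys = d1.map Prod.fst := by
    show (d1.foldl mergeA1 PySem.Dict.empty).items.map Prod.fst = _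
    rw [hm1items, List.map_map]
    rfl
  have hm1nd : (d1.foldl mergeA1 PySem.Dict.empty).keys.Nodup := hm1keys ▸ h1
  obtain ⟨hm2items, hm2nd⟩ := pass2_items d2 _ hm1nd h2
  set m2 := d2.foldl mergeA2 (d1.foldl mergeA1 PySem.Dict.empty) with hm2def
  have h3 := pass3_items m2.keys m2 hm2nd hm2nd
    (fun k hk => (PySem.Dict.contains_iff_mem_keys m2 k).mpr hk)
  show (m2.keys.foldl mergeA3 m2).items.map (fun p => (p.1, p.2.items)) = canonMerge d1 d2
  rw [h3, List.map_map]
  have hGm2 : m2.items.map ((fun p : String × PySem.Dict String (Option Int) => (p.1, p.2.items))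
        ∘ fun p => if p.1 ∈ m2.keys then (p.1, gfix p.2) else p)
      = m2.items.map (fun p => (p.1, (gfix p.2).items)) := by
    apply List.map_congr_left
    intro p hp
    have : p.1 ∈ m2.keys := List.mem_map_of_mem hp
    simp [Function.comp, this]
  rw [hGm2, hm2items, List.map_append, List.map_map, hm1items, List.map_map, List.map_map]
  simp only [canonMerge]
  congr 1
  · apply List.map_congr_left
    intro kv _
    cases hfind : d2.find? (fun r => r.1 == kv.1) with
    | none =>
        have hget : (PySem.Dict.mk d2).get? kv.1 = none := by
          rw [get?_mk_find?, hfind]; rfl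
        simp only [Function.comp, hfind, hget]
        rfl
    | some r =>
        have hget : (PySem.Dict.mk d2).get? kv.1 = some r.2 := by
          rw [get?_mk_find?, hfind]; rfl
        simp only [Function.comp, hfind, hget]
        rfl
  · have hfil : d2.filter (fun q => !(d1.foldl mergeA1 PySem.Dict.empty).contains q.1)
        = d2.filter (fun q => !decide (q.1 ∈ d1.map Prod.fst)) := by
      apply List.filter_congr
      intro r _
      rw [PySem.Dict.contains_eq_decide_mem_keys, hm1keys]
    rw [hfil]
    apply List.map_congr_left
    intro q _
    rfl

-- B's first pass: its invariant — entries appended in dict1 order, each 'previous' read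
-- from the ORIGINAL working copy (later pops only remove other, distinct keys), and the
-- working copy ends as the items not keyed by dict1
theorem passB1 (d1 : List (String × Int)) :
    ∀ (rest : PySem.Dict String Int) (out : PySem.Dict String (List (String × Option Int))),
      (d1.map Prod.fst).Nodup → (∀ kv ∈ d1, out.contains kv.1 = false) →
      ((d1.foldl mergeB1 (rest, out)).2.items
          = out.items ++ d1.map (fun kv => (kv.1, [("recent", some kv.2), ("previous", rest.get? kv.1)])))
      ∧ (d1.foldl mergeB1 (rest, out)).1.items
          = rest.items.filter (fun q => !decide (q.1 ∈ d1.map Prod.fst))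
      ∧ (d1.foldl mergeB1 (rest, out)).2.keys = out.keys ++ d1.map Prod.fst := by
  induction d1 with
  | nil => intro rest out _ _; simp
  | cons kv d1 ih =>
    intro rest out hnd hfresh
    have hknotin : kv.1 ∉ d1.map Prod.fst := (List.nodup_cons.mp hnd).1
    have hd1nd : (d1.map Prod.fst).Nodup := (List.nodup_cons.mp hnd).2
    have hckv : out.contains kv.1 = false := hfresh kv (by simp)
    -- the state after one step
    set rest' := rest.erase kv.1 with hrest'
    set out' := out.insert kv.1 [("recent", some kv.2), ("previous", rest.get? kv.1)] with hout'
    have hfresh' : ∀ q ∈ d1, out'.contains q.1 = false := by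
      intro q hq
      rw [hout', PySem.Dict.contains_insert]
      have hne : (q.1 == kv.1) = false := by
        simp only [beq_eq_false_iff_ne, ne_eq]
        intro h
        exact hknotin (h ▸ List.mem_map_of_mem hq)
      rw [hne, hfresh q (List.mem_cons_of_mem _ hq)]
      rfl
    obtain ⟨hI, hR, hK⟩ := ih rest' out' hd1nd hfresh'
    have houtitems : out'.items = out.items
        ++ [(kv.1, [("recent", some kv.2), ("previous", rest.get? kv.1)])] :=
      PySem.Dict.items_insert_of_not_contains out _ hckv
    have houtkeys : out'.keys = out.keys ++ [kv.1] := by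
      show out'.items.map Prod.fst = _
      rw [houtitems]; simp [PySem.Dict.keys]
    have hstep : (kv :: d1).foldl mergeB1 (rest, out) = d1.foldl mergeB1 (rest', out') := rfl
    refine ⟨?_, ?_, ?_⟩
    · rw [hstep, hI, houtitems, List.append_assoc, List.map_cons, List.singleton_append]
      congr 2
      apply List.map_congr_left
      intro q hq
      have hne : q.1 ≠ kv.1 := by
        intro h
        exact hknotin (h ▸ List.mem_map_of_mem hq)
      rw [hrest', get?_erase_of_ne rest kv.1 q.1 hne]
    · rw [hstep, hR, hrest']
      show (rest.items.filter _).filter _ = _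
      rw [List.filter_filter]
      apply List.filter_congr
      intro q _
      simp only [List.map_cons, List.mem_cons]
      by_cases h : q.1 = kv.1 <;> simp [h]
    · rw [hstep, hK, houtkeys, List.append_assoc]
      rfl

-- B equals the canonical list
theorem merge_dicts_alt_eq_canon (d1 d2 : List (String × Int))
    (h1 : (d1.map Prod.fst).Nodup) (h2 : (d2.map Prod.fst).Nodup) :
    merge_dicts_alt d1 d2 = canonMerge d1 d2 := by
  obtain ⟨hI, hR, hK⟩ := passB1 d1 (PySem.Dict.ofList d2) PySem.Dict.empty h1
    (by intro a _; simp [PySem.Dict.contains_empty])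
  set st := d1.foldl mergeB1 (PySem.Dict.ofList d2, PySem.Dict.empty) with hst
  rw [ofList_eq_mk d2 h2] at hI hR
  have hmkitems : (PySem.Dict.mk d2).items = d2 := rfl
  rw [hmkitems] at hR
  -- the leftover keys avoid dict1's keys and are distinct
  have hfresh2 : ∀ q ∈ st.1.items, st.2.contains q.1 = false := by
    intro q hq
    rw [hR] at hq
    have hnotin : ¬ q.1 ∈ d1.map Prod.fst := by
      have := (List.mem_filter.mp hq).2
      simpa using this
    rw [PySem.Dict.contains_eq_decide_mem_keys, hK]
    simp [hnotin, PySem.Dict.keys_empty]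
  have hnd2 : (st.1.items.map Prod.fst).Nodup := by
    rw [hR]
    exact h2.sublist (List.filter_sublist.map Prod.fst)
  have hfold := PySem.Dict.items_foldl_insert_fresh st.1.items Prod.fst
    (fun q => [("previous", some q.2), ("recent", none)]) st.2 hfresh2 hnd2
  show (st.1.items.foldl mergeB2 st.2).items = canonMerge d1 d2
  have hB2 : st.1.items.foldl mergeB2 st.2
      = st.1.items.foldl (fun d a => d.insert a.1 [("previous", some a.2), ("recent", none)]) st.2 := rfl
  rw [hB2, hfold, hI, hR]
  simp [canonMerge, PySem.Dict.empty]

-- ===== VERDICT (by name: the statement is the Claim_ definition above) =====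
theorem merge_dicts_spec : Claim_equal_merge_dicts := by
  intro d1 d2 _ hpre
  obtain ⟨h1, h2⟩ := hpre
  show merge_dicts d1 d2 = merge_dicts_alt d1 d2
  rw [merge_dicts_eq_canon d1 d2 h1 h2, merge_dicts_alt_eq_canon d1 d2 h1 h2]
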